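-- pv_equiv track=rewrite | github.com/8fqycwdt8v-oss/chemclaw | services/mcp_tools/common/fingerprint.py | bits_to_pgvector_literal
-- ===== SOURCE A (Python) =====
-- def bits_to_pgvector_literal(on_bits: list[int], n_bits: int) -> str:
--     """Encode a sparse on-bits list as the pgvector literal string '[0,1,0,...]'.
--
--     Out-of-range bits are silently dropped, mirroring the TS implementation.
--     """
--     if n_bits <= 0:
--         raise ValueError("n_bits must be positive")
--     bits = [0] * n_bits
--     for b in on_bits:
--         if 0 <= b < n_bits:
--             bits[b] = 1
--     return "[" + ",".join(str(b) for b in bits) + "]"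
-- ===== SOURCE B (Python) =====
-- def bits_to_pgvector_literal(on_bits: list[int], n_bits: int) -> str:
--     """Encode a sparse on-bits list as the pgvector literal string '[0,1,0,...]'.
--
--     Sort the distinct in-range on-bits, then build the vector by run-length
--     gap filling: a run of zeros up to each on-bit, a one, and a final zero run.
--     """
--     if n_bits <= 0:
--         raise ValueError("n_bits must be positive")
--     cells = []
--     prev = 0
--     for b in sorted({x for x in on_bits if 0 <= x < n_bits}):
--         cells.extend(["0"] * (b - prev))
--         cells.append("1")
--         prev = b + 1
--     cells.extend(["0"] * (n_bits - prev))
--     return "[" + ",".join(cells) + "]"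
-- ===== Notes on version B (the rewrite author's own statement) =====
-- stated objective: alternative
-- what changed: Replaces A's dense scatter (allocate an n_bits zero list, write 1s into it, then stringify every cell) with sort-then-scan run-length construction: sort the distinct in-range on-bits once and emit a zero run between consecutive on-bits plus the trailing run, so no dense array is written and no per-position test is made.
import Mathlib
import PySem

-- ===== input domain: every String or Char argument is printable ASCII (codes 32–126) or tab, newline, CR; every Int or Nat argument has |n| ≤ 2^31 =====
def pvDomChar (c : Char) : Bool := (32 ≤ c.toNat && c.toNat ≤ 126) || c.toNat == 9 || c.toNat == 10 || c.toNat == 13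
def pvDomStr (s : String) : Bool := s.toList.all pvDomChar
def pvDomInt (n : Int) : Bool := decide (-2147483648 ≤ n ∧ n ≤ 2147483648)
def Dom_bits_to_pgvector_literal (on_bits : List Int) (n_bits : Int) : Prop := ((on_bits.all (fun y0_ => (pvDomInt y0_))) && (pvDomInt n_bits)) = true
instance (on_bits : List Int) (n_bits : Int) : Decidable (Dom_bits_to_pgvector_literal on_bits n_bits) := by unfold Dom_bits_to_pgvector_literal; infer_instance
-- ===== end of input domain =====

-- B replaces A's dense scatter with sort-then-scan run-length construction over the
-- sorted distinct in-range on-bits (alternative; A raises ValueError for n_bits ≤ 0, excluded by Pre_).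

-- ===== PORT A =====
def bits_to_pgvector_literal (on_bits : List Int) (n_bits : Int) : String :=
  if n_bits ≤ 0 then ""  -- Python raises ValueError here; excluded by Pre_
  else
    let bits0 : List Int := List.replicate n_bits.toNat 0
    let bits : List Int := on_bits.foldl
      (fun bs b => if 0 ≤ b ∧ b < n_bits then PySem.List.pySetD bs b 1 else bs) bits0
    "[" ++ PySem.Str.join "," (bits.map PySem.Int.toStr) ++ "]"

-- ===== PORT B =====
def bits_to_pgvector_literal_alt (on_bits : List Int) (n_bits : Int) : String :=
  if n_bits ≤ 0 then ""  -- Python raises ValueError here; excluded by Pre_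
  else
    let ons : List Int := PySem.List.sorted
      (PySem.Set.ofList (on_bits.filter (fun x => decide (0 ≤ x) && decide (x < n_bits))))
      (fun x => x) false
    let st : List String × Int := ons.foldl
      (fun st b => (st.1 ++ List.replicate (b - st.2).toNat "0" ++ ["1"], b + 1)) ([], 0)
    "[" ++ PySem.Str.join "," (st.1 ++ List.replicate (n_bits - st.2).toNat "0") ++ "]"

-- ===== PRECONDITION & SPEC =====
-- A raises ValueError when n_bits ≤ 0; exactly those inputs are excluded.
def Pre_bits_to_pgvector_literal (on_bits : List Int) (n_bits : Int) : Prop := 0 < n_bits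
instance (on_bits : List Int) (n_bits : Int) : Decidable (Pre_bits_to_pgvector_literal on_bits n_bits) := by unfold Pre_bits_to_pgvector_literal; infer_instance
def pvWitness_bits_to_pgvector_literal : List Int × Int := ([0, 2, 7], 4)
def Spec_bits_to_pgvector_literal (on_bits : List Int) (n_bits : Int) (out : String) : Prop := out = bits_to_pgvector_literal_alt on_bits n_bits
instance (on_bits : List Int) (n_bits : Int) (out : String) : Decidable (Spec_bits_to_pgvector_literal on_bits n_bits out) := by unfold Spec_bits_to_pgvector_literal; infer_instance

-- ===== CLAIM =====
def Claim_equal_bits_to_pgvector_literal : Prop := ∀ (on_bits : List Int) (n_bits : Int), Dom_bits_to_pgvector_literal on_bits n_bits → Pre_bits_to_pgvector_literal on_bits n_bits → Spec_bits_to_pgvector_literal on_bits n_bits (bits_to_pgvector_literal on_bits n_bits)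

-- ===== LEMMAS AND PROOFS =====

theorem scatter_length (n : Int) (l : List Int) (bs : List Int) :
    (l.foldl (fun bs b => if 0 ≤ b ∧ b < n then PySem.List.pySetD bs b 1 else bs) bs).length
      = bs.length := by
  induction l generalizing bs with
  | nil => rfl
  | cons b t ih =>
      simp only [List.foldl_cons]
      rw [ih]
      split_ifs with h
      · rw [PySem.List.pySetD_of_nonneg bs 1 h.1, List.length_set]
      · rfl

theorem scatter_getElem (n : Int) (l : List Int) (bs : List Int) (i : Nat)
    (hi : i < bs.length) (hin : (i : Int) < n) :
    (l.foldl (fun bs b => if 0 ≤ b ∧ b < n then PySem.List.pySetD bs b 1 else bs) bs)[i]'(by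
        rw [scatter_length]; exact hi)
      = if (i : Int) ∈ l then 1 else bs[i] := by
  induction l generalizing bs with
  | nil => simp
  | cons b t ih =>
      simp only [List.foldl_cons]
      by_cases hb : 0 ≤ b ∧ b < n
      · simp only [if_pos hb, PySem.List.pySetD_of_nonneg bs 1 hb.1]
        rw [ih (bs.set b.toNat 1) (by simpa using hi)]
        by_cases ht : (i : Int) ∈ t
        · simp [ht]
        · have hset : (bs.set b.toNat 1)[i]'(by simpa using hi)
              = if b.toNat = i then 1 else bs[i] := by
            rw [List.getElem_set]
          rw [if_neg ht, hset]
          by_cases hbi : b = (i : Int)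
          · have : b.toNat = i := by omega
            simp [hbi]
          · have hne : b.toNat ≠ i := by omega
            rw [if_neg hne]
            rw [if_neg (by
              simp only [List.mem_cons]
              rintro (h | h)
              · exact hbi h.symm
              · exact ht h)]
      · simp only [if_neg hb]
        rw [ih bs hi]
        have hbi : b ≠ (i : Int) := by
          intro h; apply hb; constructor <;> omega
        simp only [List.mem_cons]
        by_cases ht : (i : Int) ∈ t
        · rw [if_pos ht, if_pos (Or.inr ht)]
        · rw [if_neg ht, if_neg (by
            rintro (h | h)
            · exact hbi h.symm
            · exact ht h)]

theorem map_const_pyRange (a b : Int) (c : String) :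
    (PySem.List.pyRange a b 1).map (fun _ => c) = List.replicate (b - a).toNat c := by
  rw [PySem.List.pyRange_one, List.map_map]
  simp [List.eq_replicate_iff]

-- run-length fill over a strictly increasing list equals the per-position 0/1 map
theorem run_spec (n : Int) (ons : List Int) (hs : ons.Pairwise (· < ·))
    (hb : ∀ x ∈ ons, 0 ≤ x ∧ x < n) :
    ∀ (parts : List String) (prev : Int), prev ≤ n → (∀ x ∈ ons, prev ≤ x) →
    (ons.foldl (fun st b => (st.1 ++ List.replicate (b - st.2).toNat "0" ++ ["1"], b + 1))
        (parts, prev)).1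
      ++ List.replicate
          (n - (ons.foldl (fun st b => (st.1 ++ List.replicate (b - st.2).toNat "0" ++ ["1"], b + 1))
            (parts, prev)).2).toNat "0"
      = parts ++ (PySem.List.pyRange prev n 1).map
          (fun i => if i ∈ ons then "1" else "0") := by
  induction ons with
  | nil =>
      intro parts prev hpn _
      simp only [List.foldl_nil, List.mem_nil_iff, if_neg (fun h => h)]
      rw [map_const_pyRange]
  | cons b t ih =>
      intro parts prev hpn hlo
      have hbt : ∀ y ∈ t, b < y := by
        intro y hy; exact (List.pairwise_cons.mp hs).1 y hy
      have hbn : 0 ≤ b ∧ b < n := hb b (by simp)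
      have hpb : prev ≤ b := hlo b (by simp)
      simp only [List.foldl_cons]
      rw [ih (List.pairwise_cons.mp hs).2 (fun x hx => hb x (by simp [hx]))
            (parts ++ List.replicate (b - prev).toNat "0" ++ ["1"]) (b + 1)
            (by omega) (fun x hx => by have := hbt x hx; omega)]
      rw [PySem.List.pyRange_one_append prev (b + 1) n (by omega) (by omega),
          PySem.List.pyRange_one_append prev b (b + 1) hpb (by omega),
          PySem.List.pyRange_one_singleton]
      have h1 : (PySem.List.pyRange prev b 1).map (fun i => if i ∈ b :: t then "1" else "0")
          = List.replicate (b - prev).toNat "0" := by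
        rw [← map_const_pyRange prev b "0"]
        apply List.map_congr_left
        intro i hi
        have hib : i < b := (PySem.List.mem_pyRange_one.mp hi).2
        rw [if_neg]
        simp only [List.mem_cons]
        rintro (h | h)
        · omega
        · have := hbt i h; omega
      have h2 : (PySem.List.pyRange (b + 1) n 1).map (fun i => if i ∈ b :: t then "1" else "0")
          = (PySem.List.pyRange (b + 1) n 1).map (fun i => if i ∈ t then "1" else "0") := by
        apply List.map_congr_left
        intro i hi
        have hib : b + 1 ≤ i := (PySem.List.mem_pyRange_one.mp hi).1
        simp only [List.mem_cons]
        simp only [or_iff_right (show ¬ i = b by omega)]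
      simp only [List.map_append, h1, h2]
      simp [List.append_assoc]

theorem bits_to_pgvector_literal_spec : Claim_equal_bits_to_pgvector_literal := by
  unfold Claim_equal_bits_to_pgvector_literal
  intro on_bits n_bits _ hpre
  unfold Pre_bits_to_pgvector_literal at hpre
  unfold Spec_bits_to_pgvector_literal bits_to_pgvector_literal bits_to_pgvector_literal_alt
  have hn : ¬ n_bits ≤ 0 := by omega
  simp only [if_neg hn]
  set ons : List Int := PySem.List.sorted
      (PySem.Set.ofList (on_bits.filter (fun x => decide (0 ≤ x) && decide (x < n_bits))))
      (fun x => x) false with hons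
  have hsorted : ons.Pairwise (· < ·) := by
    rw [hons]; exact PySem.List.sorted_ofList_pairwise_lt _
  have hmem : ∀ x, x ∈ ons ↔ (0 ≤ x ∧ x < n_bits ∧ x ∈ on_bits) := by
    intro x
    rw [hons, PySem.List.mem_sorted, PySem.Set.mem_ofList, List.mem_filter]
    simp; tauto
  have hb : ∀ x ∈ ons, 0 ≤ x ∧ x < n_bits := by
    intro x hx; have := (hmem x).mp hx; exact ⟨this.1, this.2.1⟩
  rw [run_spec n_bits ons hsorted hb [] 0 (by omega) (fun x hx => (hb x hx).1)]
  congr 2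
  simp only [List.nil_append]
  congr 1
  -- both sides are lists of the same length; compare elementwise
  apply List.ext_getElem
  · rw [List.length_map, scatter_length, List.length_replicate,
        List.length_map, PySem.List.length_pyRange_one]
    omega
  · intro i h1 h2
    have hlen : i < n_bits.toNat := by
      simpa [scatter_length, List.length_replicate] using h1
    have hin : (i : Int) < n_bits := by omega
    rw [List.getElem_map, List.getElem_map, PySem.List.getElem_pyRange_one]
    rw [scatter_getElem n_bits on_bits (List.replicate n_bits.toNat 0) i
          (by simpa using hlen) hin]
    have : ((0 : Int) + (i : Int)) ∈ ons ↔ (i : Int) ∈ on_bits := by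
      rw [hmem]; constructor
      · rintro ⟨_, _, h⟩; simpa using h
      · intro h; refine ⟨by omega, by simpa using hin, by simpa using h⟩
    by_cases hm : (i : Int) ∈ on_bits
    · rw [if_pos hm, if_pos (this.mpr hm)]; decide
    · rw [if_neg hm, if_neg (fun h => hm (this.mp h))]
      simp; decide
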